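-- pv_equiv track=rewrite | github.com/lvalentine6/algorithm_python | programmers/lv3/152995.py | solution
-- ===== SOURCE A (Python) =====
-- import math
--
-- def solution(scores):
--     answer = 1
--     n = len(scores)
--
--     sorted_s = sorted(scores, key=lambda x: (-x[0], x[1]))
--     lst = []
--     max_b = -math.inf
--     wan_score = sum(scores[0])
--
--     for a, b in sorted_s:
--         if b < max_b:
--             if scores[0][0] == a and scores[0][1] == b:
--                 return -1
--             continue
--         else:
--             lst.append(a + b)
--             max_b = max(max_b, b)
--
--     for r in lst:
--         if r > wan_score:
--             answer += 1
--
--     return answer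
-- ===== SOURCE B (Python) =====
-- def solution(scores):
--     wan_a, wan_b = scores[0][0], scores[0][1]
--     if any(a > wan_a and b > wan_b for a, b in scores):
--         return -1
--     wan_score = wan_a + wan_b
--     answer = 1
--     for a, b in scores:
--         if a + b > wan_score and not any(qa > a and qb > b for qa, qb in scores):
--             answer += 1
--     return answer
-- ===== Notes on version B (the rewrite author's own statement) =====
-- stated objective: alternative
-- what changed: Replaces the sort-by-(-a,b) plus running-max Pareto scan (with an early -1 exit inside the scan) by direct nested pairwise strict-dominance checks: one pass decides whether person 0 is dominated, then each person is counted iff undominated and with a strictly larger sum.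
-- outside the precondition, e.g. on solution([[1, 2], [2, 3], [1, 2, 7]]): A returns -1, B returns -1
import Mathlib
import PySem

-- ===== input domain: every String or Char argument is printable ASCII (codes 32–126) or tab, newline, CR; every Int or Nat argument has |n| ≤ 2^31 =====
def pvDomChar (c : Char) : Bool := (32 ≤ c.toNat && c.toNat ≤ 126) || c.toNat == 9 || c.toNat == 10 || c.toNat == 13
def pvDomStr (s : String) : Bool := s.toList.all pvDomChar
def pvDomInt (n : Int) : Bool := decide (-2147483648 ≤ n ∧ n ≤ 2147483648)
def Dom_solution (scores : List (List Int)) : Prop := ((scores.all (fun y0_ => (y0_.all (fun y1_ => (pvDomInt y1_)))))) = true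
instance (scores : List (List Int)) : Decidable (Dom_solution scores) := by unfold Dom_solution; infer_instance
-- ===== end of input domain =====

-- B replaces the sort + running-max Pareto scan by direct nested pairwise dominance checks
-- (same cost class, structurally different). Equivalence is about the return value.

-- ===== PORT A =====
-- row accessors: x[0] and x[1]; exact whenever the row has length ≥ 2 (Pre_ guarantees length 2)
def pvG0 (x : List Int) : Int := PySem.List.pyGetD x 0 0
def pvG1 (x : List Int) : Int := PySem.List.pyGetD x 1 0

-- the for-loop over sorted_s with state (max_b, lst); max_b : Option Int, none = -math.inf;
-- result none = the early `return -1`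
def pvLtMax (b : Int) : Option Int → Bool
  | none => false            -- b < -math.inf is false
  | some m => decide (b < m)

-- max(max_b, b), where max(-math.inf, b) = b
def pvNewMax (b : Int) : Option Int → Int
  | none => b
  | some m => max m b

def pvScanA (w0 w1 : Int) : List (List Int) → Option Int → List Int → Option (List Int)
  | [], _, lst => some lst
  | row :: rest, maxb, lst =>
    let a := pvG0 row
    let b := pvG1 row
    if pvLtMax b maxb then
      if w0 = a ∧ w1 = b then none
      else pvScanA w0 w1 rest maxb lst
    else pvScanA w0 w1 rest (some (pvNewMax b maxb)) (lst ++ [a + b])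

def solution (scores : List (List Int)) : Int :=
  match scores with
  | [] => 0  -- Python raises IndexError here; excluded by Pre_
  | first :: _ =>
    let wan_score := first.sum
    let sorted_s := PySem.List.sorted2 scores (fun x => -(pvG0 x)) (fun x => pvG1 x)
    match pvScanA (pvG0 first) (pvG1 first) sorted_s none [] with
    | none => -1
    | some lst => lst.foldl (fun answer r => if r > wan_score then answer + 1 else answer) 1

-- ===== PORT B =====
-- the row unpackings/indexings of Source B, read through pvG0/pvG1 (exact on rows of
-- length 2, which Pre_ guarantees); `any(qa > a and qb > b for qa, qb in scores)`:
def dominatedIn (scores : List (List Int)) (p : List Int) : Bool :=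
  scores.any (fun q => decide (pvG0 q > pvG0 p) && decide (pvG1 q > pvG1 p))

def solution_alt (scores : List (List Int)) : Int :=
  match scores with
  | [] => 0  -- Python raises IndexError here; excluded by Pre_
  | wan :: _ =>
    if dominatedIn scores wan then -1
    else
      let wan_score := pvG0 wan + pvG1 wan
      scores.foldl (fun answer p =>
        if pvG0 p + pvG1 p > wan_score ∧ dominatedIn scores p = false
        then answer + 1 else answer) 1

-- ===== PRECONDITION & SPEC =====
-- Pre_ excludes the inputs on which the Pythons generally raise (empty list: IndexError
-- on scores[0]; a row of length ≠ 2: IndexError in the sort key / ValueError on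
-- unpacking); on a few such inputs both Pythons still return -1 early, before reaching
-- the malformed row — see the cite.
def Pre_solution (scores : List (List Int)) : Prop :=
  scores ≠ [] ∧ ∀ r ∈ scores, r.length = 2
instance (scores : List (List Int)) : Decidable (Pre_solution scores) := by
  unfold Pre_solution; infer_instance
def pvWitness_solution : List (List Int) := [[2, 2], [1, 4], [3, 2], [3, 2], [2, 1]]

def Spec_solution (scores : List (List Int)) (out : Int) : Prop := out = solution_alt scores
instance (scores : List (List Int)) (out : Int) : Decidable (Spec_solution scores out) := by
  unfold Spec_solution; infer_instance

-- ===== CLAIM (what is proved, stated in full; the proofs are below) =====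
def Claim_equal_solution : Prop := ∀ (scores : List (List Int)), Dom_solution scores → Pre_solution scores → Spec_solution scores (solution scores)

-- ===== LEMMAS AND PROOFS =====

-- the sort order of A: p may come (weakly) before q
def pvRle (p q : List Int) : Prop :=
  pvG0 q ≤ pvG0 p ∧ (pvG0 q < pvG0 p ∨ pvG1 p ≤ pvG1 q)

-- generic: insertion by a strict "before" test yields a list pairwise in the reflexive order
theorem pairwise_insertBy {α : Type} (before : α → α → Bool)
    (asym : ∀ a b, before a b = true → before b a = false)
    (trans : ∀ a b c, before b a = false → before c b = false → before c a = false)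
    (x : α) (ys : List α) (h : ys.Pairwise (fun a b => before b a = false)) :
    (PySem.List.insertBy before x ys).Pairwise (fun a b => before b a = false) := by
  induction ys with
  | nil => simp [PySem.List.insertBy]
  | cons y ys ih =>
    rw [List.pairwise_cons] at h
    obtain ⟨hy, hys⟩ := h
    simp only [PySem.List.insertBy]
    rcases Bool.eq_false_or_eq_true (before x y) with hb | hb
    · rw [if_pos hb]
      refine List.Pairwise.cons ?_ (List.Pairwise.cons hy hys)
      intro z hz
      rw [List.mem_cons] at hz
      rcases hz with hz | hz
      · subst hz; exact asym _ _ hb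
      · exact trans _ _ _ (asym _ _ hb) (hy z hz)
    · rw [if_neg (by simp [hb])]
      refine List.Pairwise.cons ?_ (ih hys)
      intro z hz
      rw [PySem.List.mem_insertBy] at hz
      rcases hz with rfl | hz
      · exact hb
      · exact hy z hz

theorem pairwise_foldl_insertBy {α : Type} (before : α → α → Bool)
    (asym : ∀ a b, before a b = true → before b a = false)
    (trans : ∀ a b c, before b a = false → before c b = false → before c a = false) :
    ∀ (xs acc : List α), acc.Pairwise (fun a b => before b a = false) →
      (xs.foldl (fun acc x => PySem.List.insertBy before x acc) acc).Pairwise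
        (fun a b => before b a = false) := by
  intro xs
  induction xs with
  | nil => intro acc h; simpa using h
  | cons x xs ih =>
    intro acc h
    simpa using ih _ (pairwise_insertBy before asym trans x acc h)

-- A's sorted_s is pairwise in pvRle
theorem sorted2_pairwise_pvRle (scores : List (List Int)) :
    (PySem.List.sorted2 scores (fun x => -(pvG0 x)) (fun x => pvG1 x)).Pairwise pvRle := by
  have h := pairwise_foldl_insertBy
    (fun p q => decide (-(pvG0 p) < -(pvG0 q)) ||
      (!decide (-(pvG0 q) < -(pvG0 p)) && decide (pvG1 p < pvG1 q)))
    (by intro a b hab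
        simp only [Bool.or_eq_true, Bool.or_eq_false_iff, Bool.and_eq_true, Bool.and_eq_false_iff,
          Bool.not_eq_true', Bool.not_eq_false', decide_eq_true_eq,
          decide_eq_false_iff_not] at hab ⊢
        omega)
    (by intro a b c h1 h2
        simp only [Bool.or_eq_false_iff, Bool.and_eq_false_iff, Bool.not_eq_false',
          decide_eq_true_eq, decide_eq_false_iff_not] at h1 h2 ⊢
        omega)
    scores [] (by simp)
  unfold PySem.List.sorted2
  refine List.Pairwise.imp ?_ h
  intro a b hab
  simp only [Bool.or_eq_false_iff, Bool.and_eq_false_iff, Bool.not_eq_false',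
    decide_eq_true_eq, decide_eq_false_iff_not] at hab
  unfold pvRle
  omega

-- dominance only depends on the two projected coordinates
theorem dominatedIn_congr (scores : List (List Int)) (x y : List Int)
    (h0 : pvG0 x = pvG0 y) (h1 : pvG1 x = pvG1 y) :
    dominatedIn scores x = dominatedIn scores y := by
  unfold dominatedIn; rw [h0, h1]

-- the scan invariant: maxb is the running max of pvG1 over the processed prefix P,
-- lst holds the sums of the non-dominated prefix elements
theorem scan_spec (scores : List (List Int)) (w0 w1 : Int) :
    ∀ (L P : List (List Int)) (maxb : Option Int) (lst : List Int),
    (∀ p ∈ P, ∀ x ∈ L, pvRle p x) →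
    L.Pairwise pvRle →
    (P ++ L).Perm scores →
    (∀ p ∈ P, ∃ m, maxb = some m ∧ pvG1 p ≤ m) →
    (∀ m, maxb = some m → ∃ p ∈ P, pvG1 p = m) →
    pvScanA w0 w1 L maxb lst =
      if L.any (fun x => dominatedIn scores x && decide (w0 = pvG0 x) && decide (w1 = pvG1 x))
      then none
      else some (lst ++ (L.filter (fun x => !dominatedIn scores x)).map (fun x => pvG0 x + pvG1 x)) := by
  intro L
  induction L with
  | nil => intro P maxb lst _ _ _ _ _; simp [pvScanA]
  | cons x rest ih =>
    intro P maxb lst hcross hpair hperm hinv1 hinv2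
    rw [List.pairwise_cons] at hpair
    obtain ⟨hxr, hrest⟩ := hpair
    -- characterize the drop condition
    have hdropped_iff : pvLtMax (pvG1 x) maxb = true ↔
        ∃ p ∈ P, pvG1 x < pvG1 p := by
      constructor
      · intro h
        rcases hm : maxb with _ | m
        · simp [hm, pvLtMax] at h
        · rw [hm] at h
          simp only [pvLtMax, decide_eq_true_eq] at h
          obtain ⟨p, hp, hpm⟩ := hinv2 m hm
          exact ⟨p, hp, by omega⟩
      · rintro ⟨p, hp, hlt⟩
        obtain ⟨m, hm, hle⟩ := hinv1 p hp
        rw [hm]; simp only [pvLtMax, decide_eq_true_eq]; omega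
    -- dominated ↔ dropped
    have hdom_iff : dominatedIn scores x = true ↔ ∃ p ∈ P, pvG1 x < pvG1 p := by
      constructor
      · intro h
        unfold dominatedIn at h
        rw [List.any_eq_true] at h
        obtain ⟨q, hq, hqd⟩ := h
        simp only [Bool.and_eq_true, decide_eq_true_eq] at hqd
        have hqmem : q ∈ P ++ x :: rest := hperm.mem_iff.mpr hq
        rw [List.mem_append, List.mem_cons] at hqmem
        rcases hqmem with hqP | rfl | hqr
        · exact ⟨q, hqP, hqd.2⟩
        · omega
        · have := hxr q hqr; unfold pvRle at this; omega
      · rintro ⟨p, hp, hlt⟩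
        have hrle := hcross p hp x (List.mem_cons_self ..)
        unfold pvRle at hrle
        unfold dominatedIn
        rw [List.any_eq_true]
        refine ⟨p, hperm.mem_iff.mp (by simp [hp]), ?_⟩
        simp only [Bool.and_eq_true, decide_eq_true_eq]
        omega
    have happ : ((P ++ [x]) ++ rest).Perm scores := by
      rw [List.append_assoc]; simpa using hperm
    have hcross' : ∀ p ∈ P ++ [x], ∀ y ∈ rest, pvRle p y := by
      intro p hp y hy
      rw [List.mem_append, List.mem_singleton] at hp
      rcases hp with hp | rfl
      · exact hcross p hp y (List.mem_cons_of_mem _ hy)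
      · exact hxr y hy
    by_cases hdrop : ∃ p ∈ P, pvG1 x < pvG1 p
    · -- x is dropped (and dominated)
      have hdom : dominatedIn scores x = true := hdom_iff.mpr hdrop
      simp only [pvScanA]
      rw [if_pos (hdropped_iff.mpr hdrop)]
      by_cases hwan : w0 = pvG0 x ∧ w1 = pvG1 x
      · rw [if_pos hwan]
        have : (x :: rest).any (fun x => dominatedIn scores x && decide (w0 = pvG0 x) && decide (w1 = pvG1 x)) = true := by
          simp [hdom, hwan.1, hwan.2]
        rw [this]; simp
      · rw [if_neg hwan]
        have hinv1' : ∀ p ∈ P ++ [x], ∃ m, maxb = some m ∧ pvG1 p ≤ m := by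
          intro p hp
          rw [List.mem_append, List.mem_singleton] at hp
          rcases hp with hp | rfl
          · exact hinv1 p hp
          · obtain ⟨q, hq, hlt⟩ := hdrop
            obtain ⟨m, hm, hle⟩ := hinv1 q hq
            exact ⟨m, hm, by omega⟩
        have hinv2' : ∀ m, maxb = some m → ∃ p ∈ P ++ [x], pvG1 p = m := by
          intro m hm
          obtain ⟨p, hp, hpm⟩ := hinv2 m hm
          exact ⟨p, by simp [hp], hpm⟩
        rw [ih (P ++ [x]) maxb lst hcross' hrest happ hinv1' hinv2']
        have hhead : (dominatedIn scores x && decide (w0 = pvG0 x) && decide (w1 = pvG1 x)) = false := by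
          rcases Decidable.not_and_iff_not_or_not.mp hwan with h | h <;> simp [h]
        rw [List.any_cons, hhead, Bool.false_or,
          List.filter_cons_of_neg (by simp [hdom])]
    · -- x is kept (and not dominated)
      have hdom : dominatedIn scores x = false := by
        rcases Bool.eq_false_or_eq_true (dominatedIn scores x) with h | h
        · exact absurd (hdom_iff.mp h) hdrop
        · exact h
      have hnotdrop : pvLtMax (pvG1 x) maxb = false := by
        rcases Bool.eq_false_or_eq_true (pvLtMax (pvG1 x) maxb) with h | h
        · exact absurd (hdropped_iff.mp h) hdrop
        · exact h
      simp only [pvScanA, hnotdrop]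
      rw [if_neg (by simp)]
      set maxb' : Option Int := some (pvNewMax (pvG1 x) maxb) with hmaxb'
      have hinv1' : ∀ p ∈ P ++ [x], ∃ m, maxb' = some m ∧ pvG1 p ≤ m := by
        intro p hp
        rw [List.mem_append, List.mem_singleton] at hp
        rcases hp with hp | rfl
        · obtain ⟨m, hm, hle⟩ := hinv1 p hp
          rw [hmaxb', hm]
          exact ⟨max m (pvG1 x), by simp [pvNewMax], le_trans hle (le_max_left _ _)⟩
        · rcases hm : maxb with _ | m
          · exact ⟨pvG1 p, by rw [hmaxb', hm]; simp [pvNewMax], le_refl _⟩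
          · exact ⟨max m (pvG1 p), by rw [hmaxb', hm]; simp [pvNewMax], le_max_right _ _⟩
      have hinv2' : ∀ m, maxb' = some m → ∃ p ∈ P ++ [x], pvG1 p = m := by
        intro v hv
        rcases hm : maxb with _ | m
        · rw [hmaxb', hm] at hv
          simp only [pvNewMax, Option.some.injEq] at hv
          exact ⟨x, by simp, hv⟩
        · rw [hmaxb', hm] at hv
          simp only [pvNewMax, Option.some.injEq] at hv
          rcases max_choice m (pvG1 x) with hmx | hmx
          · obtain ⟨p, hp, hpm⟩ := hinv2 m hm
            exact ⟨p, by simp [hp], by omega⟩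
          · exact ⟨x, by simp, by omega⟩
      rw [ih (P ++ [x]) maxb' (lst ++ [pvG0 x + pvG1 x]) hcross' hrest happ hinv1' hinv2']
      rw [List.any_cons]
      have hhead : (dominatedIn scores x && decide (w0 = pvG0 x) && decide (w1 = pvG1 x)) = false := by
        simp [hdom]
      rw [hhead, Bool.false_or, List.filter_cons_of_pos (by simp [hdom])]
      simp [List.append_assoc]

-- counting fold
theorem foldl_count (w : Int) :
    ∀ (l : List Int) (init : Int),
      l.foldl (fun answer r => if r > w then answer + 1 else answer) init =
        init + l.countP (fun r => decide (r > w)) := by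
  intro l
  induction l with
  | nil => intro init; simp
  | cons r l ih =>
    intro init
    simp only [List.foldl_cons, List.countP_cons, ih]
    by_cases h : r > w
    · simp only [if_pos h, decide_eq_true_eq]
      omega
    · simp only [if_neg h, decide_eq_true_eq]
      omega

theorem foldl_count_alt (scores : List (List Int)) (w : Int) :
    ∀ (l : List (List Int)) (init : Int),
      l.foldl (fun answer p =>
          if pvG0 p + pvG1 p > w ∧ dominatedIn scores p = false
          then answer + 1 else answer) init =
        init + l.countP (fun p => decide (pvG0 p + pvG1 p > w) && !dominatedIn scores p) := by
  intro l
  induction l with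
  | nil => intro init; simp
  | cons p l ih =>
    intro init
    simp only [List.foldl_cons, List.countP_cons, ih]
    by_cases h : pvG0 p + pvG1 p > w ∧ dominatedIn scores p = false
    · rw [if_pos h]
      have hb : (decide (pvG0 p + pvG1 p > w) && !dominatedIn scores p) = true := by
        simp [h.1, h.2]
      rw [hb]
      rw [if_pos (show (true : Bool) = true from rfl)]
      omega
    · rw [if_neg h]
      have hb : (decide (pvG0 p + pvG1 p > w) && !dominatedIn scores p) = false := by
        rcases Decidable.not_and_iff_not_or_not.mp h with h' | h' <;> simp_all
      rw [hb]
      simp only [Bool.false_eq_true, if_false]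
      omega

-- ===== VERDICT (by name: the statement is the Claim_ definition above) =====
theorem solution_spec : Claim_equal_solution := by
  intro scores _hdom hpre
  obtain ⟨hne, hlen⟩ := hpre
  unfold Spec_solution
  match scores with
  | [] => exact absurd rfl hne
  | first :: t =>
    have hfst : first.length = 2 := hlen first (List.mem_cons_self ..)
    obtain ⟨u, v, rfl⟩ := List.length_eq_two.mp hfst
    have hg0 : pvG0 [u, v] = u := by simp [pvG0, PySem.List.pyGetD, PySem.List.pyGet?, PySem.List.pyIdx?]
    have hg1 : pvG1 [u, v] = v := by simp [pvG1, PySem.List.pyGetD, PySem.List.pyGet?, PySem.List.pyIdx?]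
    set scores := [u, v] :: t with hscores
    set S := PySem.List.sorted2 scores (fun x => -(pvG0 x)) (fun x => pvG1 x) with hS
    have hperm : S.Perm scores := PySem.List.sorted2_perm ..
    have hscan := scan_spec scores (pvG0 [u, v]) (pvG1 [u, v]) S [] none []
      (by intro p hp; simp at hp) (sorted2_pairwise_pvRle scores)
      (by simpa using hperm) (by intro p hp; simp at hp) (by intro m hm; simp at hm)
    -- the -1 condition of the scan is exactly B's dominance test on scores[0]
    have hany : S.any (fun x => dominatedIn scores x && decide (pvG0 [u, v] = pvG0 x) &&
        decide (pvG1 [u, v] = pvG1 x)) = dominatedIn scores [u, v] := by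
      rcases Bool.eq_false_or_eq_true (dominatedIn scores [u, v]) with hd | hd
      · rw [hd]
        rw [List.any_eq_true]
        exact ⟨[u, v], hperm.mem_iff.mpr (by simp [hscores]), by simp [hd]⟩
      · rw [hd]
        rw [List.any_eq_false]
        intro x hx
        by_cases he : pvG0 [u, v] = pvG0 x ∧ pvG1 [u, v] = pvG1 x
        · have hdx : dominatedIn scores x = false := by
            rw [dominatedIn_congr scores x [u, v] he.1.symm he.2.symm]; exact hd
          simp [hdx]
        · rcases Decidable.not_and_iff_not_or_not.mp he with h' | h' <;> simp [h']
    show solution scores = solution_alt scores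
    rw [hg0, hg1] at hscan hany
    rw [hscores]
    unfold solution solution_alt
    simp only [← hscores, ← hS, hg0, hg1]
    rw [hscan, hany]
    rcases Bool.eq_false_or_eq_true (dominatedIn scores [u, v]) with hd | hd
    · rw [hd]
      simp
    · rw [hd]
      rw [if_neg (by simp), if_neg (by simp)]
      have hsum : ([u, v] : List Int).sum = u + v := by simp
      rw [List.nil_append]
      show List.foldl (fun answer r => if r > [u, v].sum then answer + 1 else answer) 1
        (List.map (fun x => pvG0 x + pvG1 x) (List.filter (fun x => !dominatedIn scores x) S)) = _
      rw [foldl_count (List.sum [u, v]), foldl_count_alt scores (u + v)]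
      rw [List.countP_map, List.countP_filter]
      rw [hperm.countP_eq]
      have hpred : ∀ q : List Int,
          (decide (pvG0 q + pvG1 q > [u, v].sum) && !dominatedIn scores q) =
          (decide (pvG0 q + pvG1 q > u + v) && !dominatedIn scores q) := by
        intro q; rw [hsum]
      rw [List.countP_congr (fun a _ => by simp only [Function.comp_apply]; rw [hpred a])]
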